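-- pv_equiv track=rewrite | github.com/Redorangegamez/MJSTeamLeagueBot | majsoul_api.py | decode_id
-- ===== SOURCE A (Python) =====
-- def decode_id(pid: int) -> int:
--     e = pid
--     e -= 10_000_000
--     if e <= 0:
--         return 0
--     t = e & 0x3FFFFFF
--     for _ in range(5):
--         t = ((t & 0x1FFFF) << 9) | (t >> 17)
--     return ((e & -0x4000000) + t) ^ 6139246
-- ===== SOURCE B (Python) =====
-- def decode_id(pid: int) -> int:
--     e = pid - 10_000_000
--     if e <= 0:
--         return 0
--     # split e = high + low at the 2**26 boundary using plain arithmetic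
--     low = e % 67108864
--     # five left-rotations by 9 over 26 bits == one rotation by 19 = moving the
--     # bottom 7 "digits" (base 2) of low to the top: (low % 128)*2**19 + low // 128
--     t = (low % 128) * 524288 + low // 128
--     return (e - low + t) ^ 6139246
-- ===== Notes on version B (the rewrite author's own statement) =====
-- stated objective: simpler
-- what changed: A's five-pass bit-mask-and-shift loop is replaced by loop-free plain integer arithmetic: the high/low split is done with remainder and floor division, and the net rotation of the low part is a single closed-form expression, so no loop, mask or shift remains.
import Mathlib
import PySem

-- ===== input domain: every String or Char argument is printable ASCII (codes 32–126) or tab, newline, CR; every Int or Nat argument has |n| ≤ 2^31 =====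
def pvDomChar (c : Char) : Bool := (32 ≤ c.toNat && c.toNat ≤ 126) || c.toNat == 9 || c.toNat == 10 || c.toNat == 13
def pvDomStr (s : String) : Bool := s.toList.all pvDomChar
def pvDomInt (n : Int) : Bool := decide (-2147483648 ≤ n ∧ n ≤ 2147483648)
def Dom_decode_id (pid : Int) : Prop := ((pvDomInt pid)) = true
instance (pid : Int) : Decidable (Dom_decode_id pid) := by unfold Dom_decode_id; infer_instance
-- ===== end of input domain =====

-- B replaces A's five-pass bit-mask-and-shift loop by loop-free plain arithmetic (remainder, floor division and a closed-form rotation); return values are identical.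

-- ===== PORT A =====
def decode_id (pid : Int) : Int :=
  let e := pid - 10000000
  if e ≤ 0 then 0
  else
    let t := PySem.Int.band e 67108863
    let t := (List.range 5).foldl
      (fun t _ => PySem.Int.bor ((PySem.Int.band t 131071) <<< 9) (t >>> 17)) t
    PySem.Int.bxor (PySem.Int.band e (-67108864) + t) 6139246

-- ===== PORT B =====
def decode_id_alt (pid : Int) : Int :=
  let e := pid - 10000000
  if e ≤ 0 then 0
  else
    let low := PySem.Int.mod e 67108864
    let t := PySem.Int.mod low 128 * 524288 + PySem.Int.floordiv low 128
    PySem.Int.bxor (e - low + t) 6139246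

-- ===== PRECONDITION & SPEC =====
def Spec_decode_id (pid : Int) (out : Int) : Prop := out = decode_id_alt pid
instance (pid : Int) (out : Int) : Decidable (Spec_decode_id pid out) := by unfold Spec_decode_id; infer_instance

-- ===== CLAIM (what is proved, stated in full; the proofs are below) =====
def Claim_equal_decode_id : Prop := ∀ (pid : Int), Dom_decode_id pid → Spec_decode_id pid (decode_id pid)

-- ===== LEMMAS AND PROOFS =====

-- one rot-left-9 step of A's loop, in div/mod arithmetic, for a 26-bit value
theorem pv_step_arith (t : ℕ) (h : t < 67108864) :
    ((t &&& 131071) <<< 9) ||| (t >>> 17) = (t % 131072) * 512 + t / 131072 := by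
  have hmask : t &&& 131071 = t % 131072 := by
    simpa using Nat.and_two_pow_sub_one_eq_mod t 17
  have hlt : t >>> 17 < 2 ^ 9 := by
    rw [Nat.shiftRight_eq_div_pow]; omega
  rw [hmask, ← Nat.shiftLeft_add_eq_or_of_lt hlt, Nat.shiftLeft_eq,
      Nat.shiftRight_eq_div_pow]

-- five of A's bit-rotation steps equal B's closed arithmetic form on 26-bit input
set_option maxRecDepth 4096 in
theorem pv_rot5_eq (n : ℕ) (h : n < 67108864) :
    (List.range 5).foldl (fun t _ => ((t &&& 131071) <<< 9) ||| (t >>> 17)) n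
      = (n % 128) * 524288 + n / 128 := by
  have hfold : (List.range 5).foldl (fun t _ => ((t &&& 131071) <<< 9) ||| (t >>> 17)) n
      = ((((((((((n &&& 131071) <<< 9 ||| n >>> 17) &&& 131071) <<< 9 |||
        ((n &&& 131071) <<< 9 ||| n >>> 17) >>> 17) &&& 131071) <<< 9 |||
        ((((n &&& 131071) <<< 9 ||| n >>> 17) &&& 131071) <<< 9 |||
          ((n &&& 131071) <<< 9 ||| n >>> 17) >>> 17) >>> 17) &&& 131071) <<< 9 |||
        ((((((n &&& 131071) <<< 9 ||| n >>> 17) &&& 131071) <<< 9 |||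
          ((n &&& 131071) <<< 9 ||| n >>> 17) >>> 17) &&& 131071) <<< 9 |||
          ((((n &&& 131071) <<< 9 ||| n >>> 17) &&& 131071) <<< 9 |||
            ((n &&& 131071) <<< 9 ||| n >>> 17) >>> 17) >>> 17) >>> 17) &&& 131071) <<< 9 |||
        ((((((((n &&& 131071) <<< 9 ||| n >>> 17) &&& 131071) <<< 9 |||
          ((n &&& 131071) <<< 9 ||| n >>> 17) >>> 17) &&& 131071) <<< 9 |||
          ((((n &&& 131071) <<< 9 ||| n >>> 17) &&& 131071) <<< 9 |||
            ((n &&& 131071) <<< 9 ||| n >>> 17) >>> 17) >>> 17) &&& 131071) <<< 9 |||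
          ((((((n &&& 131071) <<< 9 ||| n >>> 17) &&& 131071) <<< 9 |||
            ((n &&& 131071) <<< 9 ||| n >>> 17) >>> 17) &&& 131071) <<< 9 |||
            ((((n &&& 131071) <<< 9 ||| n >>> 17) &&& 131071) <<< 9 |||
              ((n &&& 131071) <<< 9 ||| n >>> 17) >>> 17) >>> 17) >>> 17) >>> 17) := rfl
  rw [hfold]
  -- decompose n into the bit chunks cut by the rotations: bits 0..6, 7, 8..15, 16, 17..24, 25
  obtain ⟨c0, c1, c2, c3, c4, c5, hn, b0, b1, b2, b3, b4, b5⟩ :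
      ∃ c0 c1 c2 c3 c4 c5 : ℕ,
        n = c0 + c1 * 128 + c2 * 256 + c3 * 65536 + c4 * 131072 + c5 * 33554432 ∧
        c0 < 128 ∧ c1 < 2 ∧ c2 < 256 ∧ c3 < 2 ∧ c4 < 256 ∧ c5 < 2 := by
    exact ⟨n % 128, n / 128 % 2, n / 256 % 256, n / 65536 % 2, n / 131072 % 256,
           n / 33554432, by omega, by omega, by omega, by omega, by omega, by omega,
           by omega⟩
  have e1 : ((n &&& 131071) <<< 9) ||| (n >>> 17)
      = c4 + c5 * 256 + c0 * 512 + c1 * 65536 + c2 * 131072 + c3 * 33554432 := by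
    rw [pv_step_arith n h]; omega
  rw [e1]
  have e2 : (((c4 + c5 * 256 + c0 * 512 + c1 * 65536 + c2 * 131072 + c3 * 33554432) &&& 131071) <<< 9)
        ||| ((c4 + c5 * 256 + c0 * 512 + c1 * 65536 + c2 * 131072 + c3 * 33554432) >>> 17)
      = c2 + c3 * 256 + c4 * 512 + c5 * 131072 + c0 * 262144 + c1 * 33554432 := by
    rw [pv_step_arith _ (by omega)]; omega
  rw [e2]
  have e3 : (((c2 + c3 * 256 + c4 * 512 + c5 * 131072 + c0 * 262144 + c1 * 33554432) &&& 131071) <<< 9)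
        ||| ((c2 + c3 * 256 + c4 * 512 + c5 * 131072 + c0 * 262144 + c1 * 33554432) >>> 17)
      = c5 + c0 * 2 + c1 * 256 + c2 * 512 + c3 * 131072 + c4 * 262144 := by
    rw [pv_step_arith _ (by omega)]; omega
  rw [e3]
  have e4 : (((c5 + c0 * 2 + c1 * 256 + c2 * 512 + c3 * 131072 + c4 * 262144) &&& 131071) <<< 9)
        ||| ((c5 + c0 * 2 + c1 * 256 + c2 * 512 + c3 * 131072 + c4 * 262144) >>> 17)
      = c3 + c4 * 2 + c5 * 512 + c0 * 1024 + c1 * 131072 + c2 * 262144 := by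
    rw [pv_step_arith _ (by omega)]; omega
  rw [e4]
  have e5 : (((c3 + c4 * 2 + c5 * 512 + c0 * 1024 + c1 * 131072 + c2 * 262144) &&& 131071) <<< 9)
        ||| ((c3 + c4 * 2 + c5 * 512 + c0 * 1024 + c1 * 131072 + c2 * 262144) >>> 17)
      = c1 + c2 * 2 + c3 * 512 + c4 * 1024 + c5 * 262144 + c0 * 524288 := by
    rw [pv_step_arith _ (by omega)]; omega
  rw [e5]
  clear e1 e2 e3 e4 e5 hfold h
  subst hn
  omega

-- Nat-cast of a shift on Int is the Nat shift, cast (definitional)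
theorem pv_shl9 (k : ℕ) : ((k : Int) <<< (9 : Int)) = ↑(k <<< 9) := rfl
theorem pv_shr17 (k : ℕ) : ((k : Int) >>> (17 : Int)) = ↑(k >>> 17) := rfl

-- cast transport: A's Int rotation step on a Nat-cast argument is the Nat step, cast
theorem pv_step_cast (k : ℕ) :
    PySem.Int.bor ((PySem.Int.band (↑k) 131071) <<< 9) ((↑k : Int) >>> 17)
      = ↑(((k &&& 131071) <<< 9) ||| (k >>> 17)) := by
  have h1 : (131071 : Int) = ((131071 : ℕ) : Int) := by norm_num
  rw [h1, PySem.Int.band_natCast, pv_shl9, pv_shr17, PySem.Int.bor_natCast]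

-- A's high-bits mask with the NEGATIVE constant, on a Nat-cast argument
theorem pv_band_neg (n : ℕ) :
    PySem.Int.band (↑n : Int) (-67108864) = ↑(n - (n &&& 67108863)) := by
  unfold PySem.Int.band
  norm_num
  rfl

-- ===== VERDICT (by name: the statement is the Claim_ definition above) =====
theorem decode_id_spec : Claim_equal_decode_id := by
  intro pid _
  unfold Spec_decode_id decode_id decode_id_alt
  simp only []
  by_cases hle : pid - 10000000 ≤ 0
  · simp [hle]
  · simp only [if_neg hle]
    congr 1
    -- both sides' first argument of the xor
    obtain ⟨n, hn⟩ : ∃ n : ℕ, pid - 10000000 = (↑n : Int) :=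
      ⟨(pid - 10000000).toNat, by omega⟩
    rw [hn]
    -- B's pieces as Nat casts
    have hm64 : (67108864 : Int) = ((67108864 : ℕ) : Int) := by norm_num
    have hm128 : (128 : Int) = ((128 : ℕ) : Int) := by norm_num
    have hlow : PySem.Int.mod (↑n : Int) 67108864 = ↑(n % 67108864) := by
      rw [hm64, PySem.Int.mod_natCast]
    have hmod : PySem.Int.mod (↑(n % 67108864) : Int) 128 = ↑(n % 67108864 % 128) := by
      rw [hm128, PySem.Int.mod_natCast]
    have hdiv : PySem.Int.floordiv (↑(n % 67108864) : Int) 128 = ↑(n % 67108864 / 128) := by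
      rw [hm128, PySem.Int.floordiv_natCast]
    rw [hlow, hmod, hdiv]
    -- A's pieces as Nat casts
    have hmask : n &&& 67108863 = n % 67108864 := by
      simpa using Nat.and_two_pow_sub_one_eq_mod n 26
    have hb : PySem.Int.band (↑n : Int) 67108863 = ↑(n &&& 67108863) := by
      have h1 : (67108863 : Int) = ((67108863 : ℕ) : Int) := by norm_num
      rw [h1, PySem.Int.band_natCast]
    rw [hb, pv_band_neg]
    have hfold : ∀ k : ℕ,
        (List.range 5).foldl
          (fun t _ => PySem.Int.bor ((PySem.Int.band t 131071) <<< 9) (t >>> 17)) (↑k : Int)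
        = ↑((List.range 5).foldl (fun t _ => ((t &&& 131071) <<< 9) ||| (t >>> 17)) k) := by
      intro k
      simp only [List.range_succ, List.range_zero, List.foldl_append, List.foldl_cons,
        List.foldl_nil, List.nil_append, pv_step_cast]
    rw [hfold, pv_rot5_eq _ (by omega), hmask]
    have hle' : n % 67108864 ≤ n := Nat.mod_le n 67108864
    push_cast [hle']
    ring
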